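-- pv_equiv track=rewrite | github.com/namyoungjun96/Study | python/baekjoon/test.py | queueHandler
-- ===== SOURCE A (Python) =====
-- def queueHandler(queue1, queue2):
--     count = 0
--
--     while sum(queue1) != sum(queue2):
--         if sum(queue1) > sum(queue2):
--             queue2.append(queue1.pop(0))
--         else:
--             queue1.append(queue2.pop(0))
--         count += 1
--
--         if count > (len(queue1) + len(queue2)) * 2:
--             return -1
--
--     return count
-- ===== SOURCE B (Python) =====
-- def queueHandler(queue1, queue2):
--     limit = (len(queue1) + len(queue2)) * 2
--     a = list(queue1)
--     b = list(queue2)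
--     s1 = sum(a)
--     s2 = sum(b)
--     i = 0
--     j = 0
--     count = 0
--     while s1 != s2:
--         if s1 > s2:
--             x = a[i]
--             i += 1
--             b.append(x)
--             s1 -= x
--             s2 += x
--         else:
--             x = b[j]
--             j += 1
--             a.append(x)
--             s1 += x
--             s2 -= x
--         count += 1
--         if count > limit:
--             return -1
--     return count
-- ===== Notes on version B (the rewrite author's own statement) =====
-- stated objective: faster
-- what changed: B replaces A's per-iteration sum()/pop(0) full rescans (each O(n)) with running sums updated in O(1) and head-index pointers into growing arrays, computing the move limit once.
-- outside the precondition, e.g. on queueHandler([1, -2], [-3]): A returns 1, B returns 1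
import Mathlib
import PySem

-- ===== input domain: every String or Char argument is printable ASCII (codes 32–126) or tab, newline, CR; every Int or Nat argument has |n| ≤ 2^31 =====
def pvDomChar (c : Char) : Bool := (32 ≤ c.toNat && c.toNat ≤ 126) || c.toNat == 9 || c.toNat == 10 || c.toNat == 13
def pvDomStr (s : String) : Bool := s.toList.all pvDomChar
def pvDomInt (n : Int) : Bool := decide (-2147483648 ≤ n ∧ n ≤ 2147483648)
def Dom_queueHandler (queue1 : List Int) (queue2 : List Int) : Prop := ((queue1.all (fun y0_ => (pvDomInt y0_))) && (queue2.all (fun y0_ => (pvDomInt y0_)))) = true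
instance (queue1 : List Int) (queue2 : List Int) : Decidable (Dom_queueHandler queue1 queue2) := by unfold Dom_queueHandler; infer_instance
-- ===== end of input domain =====

-- B tracks running sums and head-index pointers instead of re-summing and pop(0)-shifting each move (measured faster in a timing run).
-- A mutates its arguments in place (pop/append); B does not — the equivalence proved here is about the return value only.


-- ===== PORT A =====
-- Fuel 2*(len1+len2)+2 is a totality device only: the count > (len1+len2)*2 check returns -1
-- after at most 2*(len1+len2)+1 iterations, so the fuel-0 branch is never reached.
def loopA (fuel : Nat) (q1 q2 : List Int) (count : Int) : Int :=
  match fuel with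
  | 0 => 0
  | f + 1 =>
    if q1.sum = q2.sum then count
    else
      let st :=
        if q1.sum > q2.sum then
          match PySem.List.pop? q1 0 with
          | some (x, rest) => (rest, q2 ++ [x])      -- queue2.append(queue1.pop(0))
          | none => (q1, q2)                          -- IndexError: outside Pre_queueHandler
        else
          match PySem.List.pop? q2 0 with
          | some (x, rest) => (q1 ++ [x], rest)      -- queue1.append(queue2.pop(0))
          | none => (q1, q2)                          -- IndexError: outside Pre_queueHandler
      let count' := count + 1
      if count' > ((st.1.length : Int) + (st.2.length : Int)) * 2 then -1
      else loopA f st.1 st.2 count'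

def queueHandler (queue1 : List Int) (queue2 : List Int) : Int :=
  loopA (2 * (queue1.length + queue2.length) + 2) queue1 queue2 0

-- ===== PORT B =====
-- a/b only grow (append); i/j are the current heads; s1/s2 are the running sums; limit is fixed.
def loopB (fuel : Nat) (a b : List Int) (i j : Nat) (s1 s2 count limit : Int) : Int :=
  match fuel with
  | 0 => 0
  | f + 1 =>
    if s1 = s2 then count
    else if s1 > s2 then
      match a[i]? with
      | none => 0                                     -- IndexError: outside Pre_queueHandler
      | some x =>
        let count' := count + 1
        if count' > limit then -1
        else loopB f a (b ++ [x]) (i + 1) j (s1 - x) (s2 + x) count' limit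
    else
      match b[j]? with
      | none => 0                                     -- IndexError: outside Pre_queueHandler
      | some x =>
        let count' := count + 1
        if count' > limit then -1
        else loopB f (a ++ [x]) b i (j + 1) (s1 + x) (s2 - x) count' limit

def queueHandler_alt (queue1 : List Int) (queue2 : List Int) : Int :=
  loopB (2 * (queue1.length + queue2.length) + 2) queue1 queue2 0 0
    queue1.sum queue2.sum 0 (((queue1.length : Int) + (queue2.length : Int)) * 2)

-- ===== PRECONDITION & SPEC =====
-- Pre_ excludes the inputs whose total sum is negative AND whose two sums are initially unequal:
-- on that region A's forced move sequence almost always empties a queue, where pop(0) raises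
-- IndexError (B's a[i]/b[j] raises IndexError at the identical step); the exact raising boundary
-- depends on the whole move trajectory and has no closed form, so the few inputs of the region
-- that reach equal sums first and return (B returns the same value there) are excluded with it.
def Pre_queueHandler (queue1 : List Int) (queue2 : List Int) : Prop :=
  0 ≤ queue1.sum + queue2.sum ∨ queue1.sum = queue2.sum
instance (queue1 : List Int) (queue2 : List Int) : Decidable (Pre_queueHandler queue1 queue2) := by
  unfold Pre_queueHandler; infer_instance
def pvWitness_queueHandler : List Int × List Int := ([1, 2], [3])

def Spec_queueHandler (queue1 : List Int) (queue2 : List Int) (out : Int) : Prop :=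
  out = queueHandler_alt queue1 queue2
instance (queue1 : List Int) (queue2 : List Int) (out : Int) : Decidable (Spec_queueHandler queue1 queue2 out) := by
  unfold Spec_queueHandler; infer_instance

-- ===== CLAIM (what is proved, stated in full; the proofs are below) =====
def Claim_equal_queueHandler : Prop := ∀ (queue1 : List Int) (queue2 : List Int), Dom_queueHandler queue1 queue2 → Pre_queueHandler queue1 queue2 → Spec_queueHandler queue1 queue2 (queueHandler queue1 queue2)

-- ===== LEMMAS AND PROOFS =====

lemma loop_eq (fuel : Nat) : ∀ (a b : List Int) (i j : Nat) (count limit : Int),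
    i ≤ a.length → j ≤ b.length →
    0 ≤ (a.drop i).sum + (b.drop j).sum →
    limit = (((a.drop i).length : Int) + ((b.drop j).length : Int)) * 2 →
    loopA fuel (a.drop i) (b.drop j) count
      = loopB fuel a b i j (a.drop i).sum (b.drop j).sum count limit := by
  induction fuel with
  | zero => intro a b i j count limit _ _ _ _; rfl
  | succ f ih =>
    intro a b i j count limit hi hj hS hlim
    rw [loopA, loopB]
    by_cases heq : (a.drop i).sum = (b.drop j).sum
    · simp [heq]
    · simp only [if_neg heq]
      by_cases hgt : (a.drop i).sum > (b.drop j).sum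
      · -- move front of queue1 to queue2
        have hne : a.drop i ≠ [] := by
          intro h
          rw [h] at hgt hS
          simp at hgt hS
          omega
        have hlt : i < a.length := by
          by_contra h
          exact hne (List.drop_eq_nil_of_le (by omega))
        have hd : a.drop i = a[i] :: a.drop (i + 1) := List.drop_eq_getElem_cons hlt
        have hget : a[i]? = some a[i] := List.getElem?_eq_getElem hlt
        have hpop : PySem.List.pop? (a.drop i) 0 = some (a[i], a.drop (i + 1)) := by
          rw [hd]; exact PySem.List.pop?_zero_cons _ _
        have hb' : b.drop j ++ [a[i]] = (b ++ [a[i]]).drop j :=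
          (List.drop_append_of_le_length hj).symm
        have hsum1 : (a.drop (i + 1)).sum = (a.drop i).sum - a[i] := by
          rw [hd, List.sum_cons]; ring
        have hsum2 : (b.drop j ++ [a[i]]).sum = (b.drop j).sum + a[i] := by
          rw [List.sum_append, List.sum_cons, List.sum_nil]; ring
        have hlen : ((a.drop (i + 1)).length : Int) + ((b.drop j ++ [a[i]]).length : Int)
            = ((a.drop i).length : Int) + ((b.drop j).length : Int) := by
          simp only [List.length_append, List.length_drop, List.length_cons, List.length_nil]
          omega
        simp only [if_pos hgt, hpop, hget]
        by_cases hcnt : count + 1 > limit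
        · rw [if_pos (by rw [hlen, ← hlim]; exact hcnt), if_pos hcnt]
        · rw [if_neg (by rw [hlen, ← hlim]; exact hcnt), if_neg hcnt]
          have := ih a (b ++ [a[i]]) (i + 1) j (count + 1) limit
            (by omega) (by simp; omega)
            (by rw [← hb', hsum1, hsum2]; omega)
            (by rw [← hb', hlen]; exact hlim)
          rw [← hb', hsum1, hsum2] at this
          exact this
      · -- move front of queue2 to queue1
        have hne : b.drop j ≠ [] := by
          intro h
          rw [h] at hS heq hgt
          simp at hS hgt
          rcases lt_or_eq_of_le hgt with h1 | h1
          · omega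
          · exact heq (by simp [h1])
        have hlt : j < b.length := by
          by_contra h
          exact hne (List.drop_eq_nil_of_le (by omega))
        have hd : b.drop j = b[j] :: b.drop (j + 1) := List.drop_eq_getElem_cons hlt
        have hget : b[j]? = some b[j] := List.getElem?_eq_getElem hlt
        have hpop : PySem.List.pop? (b.drop j) 0 = some (b[j], b.drop (j + 1)) := by
          rw [hd]; exact PySem.List.pop?_zero_cons _ _
        have ha' : a.drop i ++ [b[j]] = (a ++ [b[j]]).drop i :=
          (List.drop_append_of_le_length hi).symm
        have hsum2 : (b.drop (j + 1)).sum = (b.drop j).sum - b[j] := by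
          rw [hd, List.sum_cons]; ring
        have hsum1 : (a.drop i ++ [b[j]]).sum = (a.drop i).sum + b[j] := by
          rw [List.sum_append, List.sum_cons, List.sum_nil]; ring
        have hlen : ((a.drop i ++ [b[j]]).length : Int) + ((b.drop (j + 1)).length : Int)
            = ((a.drop i).length : Int) + ((b.drop j).length : Int) := by
          simp only [List.length_append, List.length_drop, List.length_cons, List.length_nil]
          omega
        simp only [if_neg hgt, hpop, hget]
        by_cases hcnt : count + 1 > limit
        · rw [if_pos (by rw [hlen, ← hlim]; exact hcnt), if_pos hcnt]
        · rw [if_neg (by rw [hlen, ← hlim]; exact hcnt), if_neg hcnt]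
          have := ih (a ++ [b[j]]) b i (j + 1) (count + 1) limit
            (by simp; omega) (by omega)
            (by rw [← ha', hsum1, hsum2]; omega)
            (by rw [← ha', hlen]; exact hlim)
          rw [← ha', hsum1, hsum2] at this
          exact this

-- ===== VERDICT (by name: the statement is the Claim_ definition above) =====
theorem queueHandler_spec : Claim_equal_queueHandler := by
  intro q1 q2 _ hpre
  unfold Spec_queueHandler queueHandler queueHandler_alt
  rcases hpre with hpre | heq
  · have := loop_eq (2 * (q1.length + q2.length) + 2) q1 q2 0 0 0
      (((q1.length : Int) + (q2.length : Int)) * 2)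
      (by omega) (by omega) (by simpa using hpre) (by simp)
    simpa using this
  · rw [loopA, loopB]
    simp [heq]
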